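-- pv_equiv track=rewrite | github.com/oumike/TC2-BBS-mesh | monitor_mqtt_topics.py | canonicalize_subtopic
-- ===== SOURCE A (Python) =====
-- from typing import Optional
--
-- def canonicalize_subtopic(raw_subtopic: str) -> Optional[str]:
--     """Derive the routing bucket identifier from the raw subtopic."""
--     if raw_subtopic == "":
--         return ""
--
--     trimmed = raw_subtopic
--     excl_index = trimmed.find("/!")
--     if excl_index != -1:
--         trimmed = trimmed[:excl_index]
--
--     parts: list[str] = []
--     for segment in trimmed.split("/"):
--         if not segment or segment.startswith("!"):
--             continue
--         parts.append(segment)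
--
--     if not parts:
--         return None
--
--     return parts[-1]
-- ===== SOURCE B (Python) =====
-- from typing import Optional
--
-- def canonicalize_subtopic(raw_subtopic: str) -> Optional[str]:
--     """Derive the routing bucket identifier from the raw subtopic."""
--     if raw_subtopic == "":
--         return ""
--     result: Optional[str] = None
--     for i, segment in enumerate(raw_subtopic.split("/")):
--         if i >= 1 and segment.startswith("!"):
--             break
--         if segment and not segment.startswith("!"):
--             result = segment
--     return result
-- ===== Notes on version B (the rewrite author's own statement) =====
-- stated objective: simpler
-- what changed: B replaces A's separate find('/!')+slice truncation pass and list-building filter pass by one indexed scan over the split segments that breaks at the first '!'-segment (index >= 1) and tracks only the last valid segment, returning it directly instead of building a list and taking parts[-1].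
import Mathlib
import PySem

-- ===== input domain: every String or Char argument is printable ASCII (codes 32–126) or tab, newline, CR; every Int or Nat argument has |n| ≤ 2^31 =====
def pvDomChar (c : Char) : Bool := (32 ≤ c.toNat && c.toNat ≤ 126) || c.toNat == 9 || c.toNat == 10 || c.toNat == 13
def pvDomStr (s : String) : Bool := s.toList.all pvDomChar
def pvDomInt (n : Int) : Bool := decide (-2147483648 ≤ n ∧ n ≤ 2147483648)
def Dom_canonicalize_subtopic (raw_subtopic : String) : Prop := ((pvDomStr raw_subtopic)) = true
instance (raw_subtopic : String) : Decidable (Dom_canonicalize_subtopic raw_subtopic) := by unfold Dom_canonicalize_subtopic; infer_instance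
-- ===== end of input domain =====

-- B fuses A's separate find("/!")+slice boundary search and list-building filter into one
-- indexed scan over the split that breaks at the first "!"-segment and tracks the last valid
-- segment (objective: simpler single pass, same linear cost).

-- ===== PORT A =====
def canonicalize_subtopic (raw_subtopic : String) : Option String :=
  if raw_subtopic = "" then some ""
  else
    let excl_index := PySem.Str.find raw_subtopic "/!"
    let trimmed :=
      if excl_index ≠ -1 then PySem.Str.slice raw_subtopic none (some excl_index)
      else raw_subtopic
    let parts :=
      ((PySem.Str.split? trimmed "/").getD []).foldl
        (fun acc segment =>
          if segment = "" ∨ PySem.Str.startswith segment "!" then acc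
          else acc ++ [segment]) []
    if parts = [] then none else PySem.List.pyGet? parts (-1)

-- ===== PORT B =====
-- the enumerate loop of Source B: index i, break at i ≥ 1 on a "!"-segment, keep the last valid one
def altGo : List String → Nat → Option String → Option String
  | [], _, result => result
  | segment :: rest, i, result =>
    if 1 ≤ i ∧ PySem.Str.startswith segment "!" then result
    else altGo rest (i + 1)
      (if segment ≠ "" ∧ ¬ PySem.Str.startswith segment "!" then some segment else result)

def canonicalize_subtopic_alt (raw_subtopic : String) : Option String :=
  if raw_subtopic = "" then some ""
  else altGo ((PySem.Str.split? raw_subtopic "/").getD []) 0 none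

-- ===== PRECONDITION & SPEC =====
def Spec_canonicalize_subtopic (raw_subtopic : String) (out : Option String) : Prop := out = canonicalize_subtopic_alt raw_subtopic
instance (raw_subtopic : String) (out : Option String) : Decidable (Spec_canonicalize_subtopic raw_subtopic out) := by unfold Spec_canonicalize_subtopic; infer_instance

-- ===== CLAIM (what is proved, stated in full; the proofs are below) =====
def Claim_equal_canonicalize_subtopic : Prop := ∀ (raw_subtopic : String), Dom_canonicalize_subtopic raw_subtopic → Spec_canonicalize_subtopic raw_subtopic (canonicalize_subtopic raw_subtopic)

-- ===== LEMMAS AND PROOFS =====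

-- splitC s = (first segment, remaining segments) of s.split('/')
def splitC : List Char → List Char × List (List Char)
  | [] => ([], [])
  | c :: t =>
    let p := splitC t
    if c = '/' then ([], p.1 :: p.2) else (c :: p.1, p.2)

-- trimC s = s truncated before its first "/!"
def trimC : List Char → List Char
  | [] => []
  | '/' :: '!' :: _ => []
  | c :: t => c :: trimC t

-- cutC segs = segs up to (excluding) the first segment that starts with '!'
def cutC : List (List Char) → List (List Char)
  | [] => []
  | seg :: rest => if PySem.Chars.startswith seg ['!'] then [] else seg :: cutC rest

-- the shared segment predicate: non-empty and not starting with '!'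
def keepQ (seg : List Char) : Bool :=
  !(String.ofList seg = "") && !(PySem.Str.startswith (String.ofList seg) "!")

theorem go_split (fuel : Nat) : ∀ (l cur : List Char) (acc : List (List Char)),
    l.length < fuel →
    PySem.Chars.splitOn.go ['/'] fuel l cur acc
      = acc.reverse ++ (cur.reverse ++ (splitC l).1) :: (splitC l).2 := by
  induction fuel with
  | zero => intro l cur acc h; omega
  | succ fuel ih =>
    intro l cur acc h
    match l with
    | [] =>
      rw [PySem.Chars.splitOn.go]
      · simp [splitC]
      · omega
    | c :: rest =>
      rw [PySem.Chars.splitOn.go]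
      by_cases hc : c = '/'
      · subst hc
        simp only [List.isPrefixOf, BEq.rfl, Bool.and_true, if_true]
        rw [ih _ _ _ (by simpa using Nat.lt_of_succ_lt_succ h)]
        simp [splitC]
      · have : List.isPrefixOf ['/'] (c :: rest) = false := by
          simp [List.isPrefixOf]; exact fun hh => absurd hh.symm hc
        rw [this]
        simp only [Bool.false_eq_true, if_false]
        rw [ih _ _ _ (by simpa using Nat.lt_of_succ_lt_succ h)]
        simp [splitC, hc]

theorem splitOn_eq (s : List Char) :
    PySem.Chars.splitOn s ['/'] = (splitC s).1 :: (splitC s).2 := by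
  rw [PySem.Chars.splitOn, go_split (s.length+1) s [] [] (by omega)]
  simp

theorem go_lb (sub : List Char) (hs : sub ≠ []) : ∀ (l : List Char) (k : Nat),
    PySem.Chars.find.go sub l k = -1 ∨ (k : Int) ≤ PySem.Chars.find.go sub l k := by
  intro l
  induction l with
  | nil => intro k; rw [PySem.Chars.find.go]; simp [hs]
  | cons c t ih =>
    intro k
    rw [PySem.Chars.find.go]
    by_cases hp : sub.isPrefixOf (c :: t)
    · simp [hp]
    · simp only [hp, Bool.false_eq_true, if_false]
      rcases ih (k+1) with h | h
      · left; exact h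
      · right; push_cast at h ⊢; omega

theorem go_trim : ∀ (l : List Char) (k : Nat),
    (if PySem.Chars.find.go ['/','!'] l k = -1 then l
     else l.take (PySem.Chars.find.go ['/','!'] l k - k).toNat) = trimC l := by
  intro l
  induction l with
  | nil => intro k; rw [PySem.Chars.find.go]; simp [trimC]
  | cons c t ih =>
    intro k
    rw [PySem.Chars.find.go]
    by_cases hp : List.isPrefixOf ['/','!'] (c :: t)
    · cases t with
      | nil => simp [List.isPrefixOf] at hp
      | cons d t' =>
        have hcd : c = '/' ∧ d = '!' := by
          have := hp
          simp [List.isPrefixOf] at this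
          exact ⟨this.1.symm ▸ rfl, this.2.symm ▸ rfl⟩
        obtain ⟨hc, hd⟩ := hcd; subst hc; subst hd
        have hk : ((k:Int)) ≠ -1 := by omega
        simp [hp, hk, trimC]
    · simp only [hp, Bool.false_eq_true, if_false]
      have ht : trimC (c :: t) = c :: trimC t := by
        cases t with
        | nil => simp [trimC]
        | cons d t' =>
          by_cases h1 : c = '/' ∧ d = '!'
          · exfalso; apply hp; simp [List.isPrefixOf, h1.1, h1.2]
          · rw [trimC.eq_def]
            split
            · rename_i heq; exact absurd heq (by simp)
            · rename_i heq
              injection heq with h2 h3; injection h3 with h4 _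
              exact absurd ⟨h2, h4⟩ h1
            · rename_i heq
              injection heq with h2 h3
              rw [← h2, ← h3]
      rw [ht]
      rcases go_lb ['/','!'] (by simp) t (k+1) with h | h
      · simp [h, ← ih (k+1)]
      · have hne : PySem.Chars.find.go ['/','!'] t (k+1) ≠ -1 := by omega
        simp only [hne, if_false]
        have hsucc : (PySem.Chars.find.go ['/','!'] t (k+1) - (k:Int)).toNat
             = (PySem.Chars.find.go ['/','!'] t (k+1) - ((k:Int)+1)).toNat + 1 := by
          push_cast at h; omega
        rw [hsucc, List.take_succ_cons]
        have hih := ih (k+1)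
        rw [if_neg hne] at hih
        push_cast at hih
        rw [hih]

theorem trimC_cons (c : Char) (t : List Char) (h : ¬ (c = '/' ∧ t.head? = some '!')) :
    trimC (c :: t) = c :: trimC t := by
  cases t with
  | nil => simp [trimC]
  | cons d t' =>
    rw [trimC.eq_def]
    split
    · rename_i heq; exact absurd heq (by simp)
    · rename_i heq
      injection heq with h2 h3; injection h3 with h4 _
      exact absurd ⟨h2, by rw [← h4]; rfl⟩ h
    · rename_i heq
      injection heq with h2 h3
      rw [← h2, ← h3]

theorem starts_fst (t : List Char) :
    PySem.Chars.startswith (splitC t).1 ['!'] = decide (t.head? = some '!') := by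
  cases t with
  | nil => simp [splitC, PySem.Chars.startswith]
  | cons c t' =>
    by_cases hc : c = '/'
    · subst hc; simp [splitC, PySem.Chars.startswith]
    · simp only [splitC, hc, if_false, PySem.Chars.startswith, List.isPrefixOf, Bool.and_true, List.head?_cons, Option.some.injEq]
      by_cases hb : c = '!'
      · subst hb; simp
      · simp [hb, beq_eq_false_iff_ne, Ne]
        exact fun h => hb h.symm

theorem split_trim (s : List Char) :
    splitC (trimC s) = ((splitC s).1, cutC (splitC s).2) := by
  induction s with
  | nil => simp [trimC, splitC, cutC]
  | cons c t ih =>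
    by_cases hc : c = '/'
    · subst hc
      by_cases hh : t.head? = some '!'
      · have : trimC ('/' :: t) = [] := by
          cases t with
          | nil => simp at hh
          | cons d t' => simp at hh; subst hh; rfl
        rw [this]
        simp [splitC, cutC, starts_fst, hh]
      · rw [trimC_cons _ _ (by simp [hh])]
        simp only [splitC]
        rw [ih]
        simp [cutC, starts_fst, hh]
    · rw [trimC_cons _ _ (by simp [hc])]
      simp only [splitC, if_neg hc]
      rw [ih]

theorem pyGet_neg_one {α : Type} (l : List α) (h : l ≠ []) :
    PySem.List.pyGet? l (-1) = l.getLast? := by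
  simp [PySem.List.pyGet?, PySem.List.pyIdx?]
  rw [if_pos (by cases l <;> simp_all)]
  simp [List.getLast?_eq_getElem?]

theorem foldl_last (l : List (List Char)) : ∀ (res : Option String),
    List.foldl (fun res seg => if keepQ seg then some (String.ofList seg) else res) res l
      = ((l.filter keepQ).getLast?.map String.ofList).or res := by
  induction l with
  | nil => intro res; simp
  | cons a l ih =>
    intro res
    rw [List.foldl_cons, ih]
    by_cases ha : keepQ a
    · simp only [List.filter_cons, ha, if_true, List.getLast?_cons]
      cases hl : (l.filter keepQ).getLast? <;> simp
    · simp [ha]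

theorem altGo_high (r : List (List Char)) : ∀ (i : Nat) (res : Option String), 1 ≤ i →
    altGo (r.map String.ofList) i res
      = List.foldl (fun res seg => if keepQ seg then some (String.ofList seg) else res) res (cutC r) := by
  induction r with
  | nil => intro i res _; simp [altGo, cutC]
  | cons seg rest ih =>
    intro i res hi
    rw [List.map_cons, altGo]
    by_cases hs : PySem.Str.startswith (String.ofList seg) "!"
    · rw [if_pos ⟨hi, hs⟩]
      have hcs : PySem.Chars.startswith seg ['!'] = true := by
        have := hs; rwa [PySem.Str.startswith, String.toList_ofList] at this
      rw [cutC, if_pos hcs]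
      simp
    · have hcs : PySem.Chars.startswith seg ['!'] = false := by
        apply Bool.eq_false_iff.mpr
        intro hh
        apply hs
        rwa [PySem.Str.startswith, String.toList_ofList]
      rw [if_neg (fun hh => hs hh.2)]
      rw [ih (i+1) _ (by omega)]
      rw [cutC]
      simp only [hcs, Bool.false_eq_true, if_false, List.foldl_cons]
      congr 1
      by_cases he : String.ofList seg = ""
      · simp [he, keepQ]
      · simp [he, keepQ]

-- ===== VERDICT (by name: the statement is the Claim_ definition above) =====
theorem canonicalize_subtopic_spec : Claim_equal_canonicalize_subtopic := by
  intro raw _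
  unfold Spec_canonicalize_subtopic canonicalize_subtopic canonicalize_subtopic_alt
  by_cases hraw : raw = ""
  · simp [hraw]
  · simp only [hraw, if_false]
    have hbang : PySem.Str.find raw "/!" = PySem.Chars.find.go ['/','!'] raw.toList 0 := rfl
    -- the trimmed string's characters are trimC of raw's characters
    have htrim : (if PySem.Str.find raw "/!" ≠ -1 then
        PySem.Str.slice raw none (some (PySem.Str.find raw "/!")) else raw).toList
        = trimC raw.toList := by
      by_cases hx : PySem.Str.find raw "/!" = -1
      · rw [if_neg (by simp only [ne_eq, not_not]; exact hx)]
        have hx' : PySem.Chars.find.go ['/','!'] raw.toList 0 = -1 := by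
          rw [← hbang]; exact hx
        have h0 := go_trim raw.toList 0
        rwa [if_pos hx'] at h0
      · have hge : (0:Int) ≤ PySem.Chars.find.go ['/','!'] raw.toList 0 := by
          rcases go_lb ['/','!'] (by simp) raw.toList 0 with h | h
          · exact absurd (hbang.trans h) hx
          · simpa using h
        rw [if_pos hx]
        rw [PySem.Str.slice, String.toList_ofList, PySem.Chars.slice_eq_listSlice, hbang,
            PySem.List.slice_to _ hge]
        have h0 := go_trim raw.toList 0
        rw [if_neg (fun hh => hx (hbang.trans hh))] at h0
        simpa using h0
    have hslash : ("/" : String).toList = ['/'] := rfl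
    have hA : (PySem.Str.split? (if PySem.Str.find raw "/!" ≠ -1 then
          PySem.Str.slice raw none (some (PySem.Str.find raw "/!")) else raw) "/").getD []
        = List.map String.ofList ((splitC raw.toList).1 :: cutC (splitC raw.toList).2) := by
      rw [PySem.Str.split?, hslash, PySem.Chars.split?, if_neg (by simp)]
      rw [htrim, splitOn_eq, split_trim]
      simp
    have hB : (PySem.Str.split? raw "/").getD []
        = List.map String.ofList ((splitC raw.toList).1 :: (splitC raw.toList).2) := by
      rw [PySem.Str.split?, hslash, PySem.Chars.split?, if_neg (by simp)]
      rw [splitOn_eq]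
      simp
    rw [hA, hB]
    -- A's append-filter loop is List.filter with keepQ
    have hfun : (fun (acc : List String) segment =>
          if segment = "" ∨ PySem.Str.startswith segment "!" = true then acc else acc ++ [segment])
        = (fun acc segment =>
          if (!(segment == "") && !(PySem.Str.startswith segment "!")) = true then acc ++ [id segment] else acc) := by
      funext acc seg
      have hb : ("!" : String).toList = ['!'] := rfl
      by_cases h1 : seg = "" <;> by_cases h2 : PySem.Str.startswith seg "!" <;>
        simp only [PySem.Str.startswith_eq, hb] at h2 <;> simp [h1, h2]
    rw [hfun, PySem.List.foldl_append_if, List.nil_append, List.map_id, List.filter_map]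
    have hpq : ((fun (segment : String) => (!(segment == "") && !(PySem.Str.startswith segment "!"))) ∘ String.ofList) = keepQ := by
      funext seg
      have hiff : (String.ofList seg = "") ↔ seg = [] := by
        constructor
        · intro h; have := congrArg String.toList h; simpa using this
        · intro h; subst h; rfl
      by_cases h : seg = []
      · subst h; simp [keepQ]
      · have h2 : (String.ofList seg == "") = false := beq_eq_false_iff_ne.mpr (fun hh => h (hiff.mp hh))
        simp [keepQ, h2, h]
    rw [hpq]
    -- B's loop
    have hcond : ¬(1 ≤ 0 ∧ PySem.Str.startswith (String.ofList (splitC raw.toList).1) "!" = true) := by simp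
    conv_rhs => rw [List.map_cons, altGo, if_neg hcond]
    rw [altGo_high _ (0+1) _ (by omega), foldl_last]
    -- compare
    set L := (splitC raw.toList) with hLdef
    by_cases hq : keepQ L.1
    · rw [List.filter_cons_of_pos hq]
      have hq1 : String.ofList L.1 ≠ "" := by intro h; simp [keepQ, h] at hq
      have hq2 : ¬ PySem.Str.startswith (String.ofList L.1) "!" = true := by
        intro h
        have hb : PySem.Chars.startswith L.1 ['!'] = true := by
          rwa [PySem.Str.startswith, String.toList_ofList] at h
        simp [keepQ, hb] at hq
      have hres : (if String.ofList L.1 ≠ "" ∧ ¬PySem.Str.startswith (String.ofList L.1) "!" = true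
          then some (String.ofList L.1) else (none : Option String)) = some (String.ofList L.1) := by
        exact if_pos ⟨hq1, hq2⟩
      rw [hres, List.map_cons]
      rw [if_neg (by simp), pyGet_neg_one _ (by simp)]
      rw [List.getLast?_cons, List.getLast?_map]
      cases hl : (List.filter keepQ (cutC L.2)).getLast? <;> simp
    · rw [List.filter_cons_of_neg hq]
      have hres : (if String.ofList L.1 ≠ "" ∧ ¬PySem.Str.startswith (String.ofList L.1) "!" = true
          then some (String.ofList L.1) else (none : Option String)) = none := by
        apply if_neg
        intro hcon
        apply hq
        have hb : PySem.Chars.startswith L.1 ['!'] = false :=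
          Bool.eq_false_iff.mpr (fun hh => hcon.2 (by
            rw [PySem.Str.startswith, String.toList_ofList]; exact hh))
        simp [keepQ, hcon.1, hb]
      rw [hres, Option.or_none]
      by_cases hfe : List.filter keepQ (cutC L.2) = []
      · simp [hfe]
      · rw [if_neg (by simpa using hfe), pyGet_neg_one _ (by simpa using hfe), List.getLast?_map]
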